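-- pv_equiv track=rewrite | github.com/OkhotnikovFN/Yandex-Algorithms | trainings_1.0/hw_5/task_c/c.py | define_treks
-- ===== SOURCE A (Python) =====
-- from typing import List, Tuple
--
-- def define_treks(n: int, mountains: List[Tuple[int, int]]) -> Tuple[List[int], List[int]]:
--     """
--     Функция которая определяет два списка с высотами подъемов при движении слева и при движении справа.
--         Параметры:
--             :param n: количество точек ломаной, задающей горную цепь
--             :type n: int
--             :param mountains: список точек ломаной, задающей горную цепь
--             :type mountains: List[Tuple[int, int]
--         Возвращаемое значение:
--             :return: два списка с высотами подъемов при движении слева и при движении справа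
--             :rtype: Tuple[List[int], List[int]]
--     """
--     mountains_left = [0]
--     for i in range(1, n):
--         if mountains[i][1] > mountains[i - 1][1]:
--             emmit = mountains_left[i - 1] + (mountains[i][1] - mountains[i - 1][1])
--         else:
--             emmit = mountains_left[i - 1]
--         mountains_left.append(emmit)
--
--     mountains_right = [0]
--     for i in range(1, n):
--         if mountains[-i - 1][1] > mountains[-i][1]:
--             emmit = mountains_right[i - 1] + (mountains[-i - 1][1] - mountains[-i][1])
--         else:
--             emmit = mountains_right[i - 1]
--         mountains_right.append(emmit)
--     return mountains_left, mountains_right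
-- ===== SOURCE B (Python) =====
-- def define_treks(n, mountains):
--     heights = [h for _, h in mountains]
--
--     def drops(hs):
--         """Prefix sums of the downhill steps of hs (starts with 0)."""
--         d = [0]
--         for a, b in zip(hs, hs[1:]):
--             d.append(d[-1] + (a - b if a > b else 0))
--         return d
--
--     # Climb from the left via the identity  uphill[i] = h[i] - h[0] + downhill[i].
--     dl = drops(heights[:n])
--     left = [0] + [heights[i] - heights[0] + dl[i] for i in range(1, n)]
--
--     # Climbing right-to-left over the last n points descends exactly where a
--     # left-to-right walk of that suffix drops: complement its drop prefix sums.
--     ds = drops(heights[len(heights) - n:])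
--     right = [ds[-1] - x for x in reversed(ds)]
--     return left, right
-- ===== Notes on version B (the rewrite author's own statement) =====
-- stated objective: alternative
-- what changed: Instead of A's two uphill accumulations (a forward one and a backward one over negative indices), B runs only forward downhill prefix sums and derives both answers algebraically: the left climb via the identity uphill[i] = h[i] - h[0] + downhill[i] on the first n points, and the right climb as the complemented reversal of the drop prefix sums of the last n points (climbing right-to-left rises exactly where the left-to-right walk drops). Pre_ excludes n >= 2 with n > len(mountains), where A raises IndexError.
import Mathlib
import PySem

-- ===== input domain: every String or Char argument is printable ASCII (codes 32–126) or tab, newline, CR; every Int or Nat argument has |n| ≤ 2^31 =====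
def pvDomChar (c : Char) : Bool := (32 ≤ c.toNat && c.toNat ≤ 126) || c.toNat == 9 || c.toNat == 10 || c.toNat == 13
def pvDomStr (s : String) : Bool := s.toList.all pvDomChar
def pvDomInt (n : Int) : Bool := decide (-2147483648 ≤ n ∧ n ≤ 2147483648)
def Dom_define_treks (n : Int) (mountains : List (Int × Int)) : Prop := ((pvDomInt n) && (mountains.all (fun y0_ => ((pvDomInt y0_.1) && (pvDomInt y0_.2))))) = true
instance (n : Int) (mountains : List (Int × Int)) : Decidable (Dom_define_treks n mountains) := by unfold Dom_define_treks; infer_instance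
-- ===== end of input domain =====

-- B replaces A's two directional uphill accumulations by forward downhill prefix sums plus
-- algebraic identities (uphill[i] = h[i] - h[0] + downhill[i]; the right climb is the
-- complemented reversal of the suffix's drop sums); equal return values on Pre_.

-- ===== PORT A =====
-- mountains[i] / mountains_left[i-1] are ported as pyGetD with a default: every access is in range
-- on Pre_define_treks, where the default is never used. The two loop bodies are named pvAStepL/pvAStepR.
def pvAStepL (mountains : List (Int × Int)) (acc : List Int) (i : Int) : List Int :=
  let emmit :=
    if (PySem.List.pyGetD mountains i (0,0)).2 > (PySem.List.pyGetD mountains (i-1) (0,0)).2 then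
      PySem.List.pyGetD acc (i-1) 0 +
        ((PySem.List.pyGetD mountains i (0,0)).2 - (PySem.List.pyGetD mountains (i-1) (0,0)).2)
    else PySem.List.pyGetD acc (i-1) 0
  acc ++ [emmit]

def pvAStepR (mountains : List (Int × Int)) (acc : List Int) (i : Int) : List Int :=
  let emmit :=
    if (PySem.List.pyGetD mountains (-i-1) (0,0)).2 > (PySem.List.pyGetD mountains (-i) (0,0)).2 then
      PySem.List.pyGetD acc (i-1) 0 +
        ((PySem.List.pyGetD mountains (-i-1) (0,0)).2 - (PySem.List.pyGetD mountains (-i) (0,0)).2)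
    else PySem.List.pyGetD acc (i-1) 0
  acc ++ [emmit]

def define_treks (n : Int) (mountains : List (Int × Int)) : List Int × List Int :=
  let mountains_left := (PySem.List.pyRange 1 n 1).foldl (pvAStepL mountains) [0]
  let mountains_right := (PySem.List.pyRange 1 n 1).foldl (pvAStepR mountains) [0]
  (mountains_left, mountains_right)

-- ===== PORT B =====
-- drops of Source B: fold over zip of consecutive pairs, appending running downhill sums after a 0.
def pvDrops (hs : List Int) : List Int :=
  (hs.zip (hs.drop 1)).foldl
    (fun d p => d ++ [PySem.List.pyGetD d (-1) 0 + (if p.1 > p.2 then p.1 - p.2 else 0)]) [0]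

def define_treks_alt (n : Int) (mountains : List (Int × Int)) : List Int × List Int :=
  let heights := mountains.map (fun p => p.2)
  let dl := pvDrops (PySem.List.slice heights none (some n))
  let left := [0] ++ (PySem.List.pyRange 1 n 1).map (fun i =>
      PySem.List.pyGetD heights i 0 - PySem.List.pyGetD heights 0 0 + PySem.List.pyGetD dl i 0)
  let ds := pvDrops (PySem.List.slice heights (some ((heights.length : Int) - n)) none)
  let right := ds.reverse.map (fun x => PySem.List.pyGetD ds (-1) 0 - x)
  (left, right)

-- ===== PRECONDITION & SPEC =====
-- A raises IndexError exactly when 2 ≤ n and n > len(mountains); exactly those inputs are excluded.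
def Pre_define_treks (n : Int) (mountains : List (Int × Int)) : Prop :=
  n ≤ (mountains.length : Int) ∨ n ≤ 1
instance (n : Int) (mountains : List (Int × Int)) : Decidable (Pre_define_treks n mountains) := by
  unfold Pre_define_treks; infer_instance
def pvWitness_define_treks : Int × (List (Int × Int)) := (2, [(0, 0), (1, 3)])

def Spec_define_treks (n : Int) (mountains : List (Int × Int)) (out : List Int × List Int) : Prop :=
  out = define_treks_alt n mountains
instance (n : Int) (mountains : List (Int × Int)) (out : List Int × List Int) : Decidable (Spec_define_treks n mountains out) := by unfold Spec_define_treks; infer_instance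

-- ===== CLAIM (what is proved, stated in full; the proofs are below) =====
def Claim_equal_define_treks : Prop := ∀ (n : Int) (mountains : List (Int × Int)), Dom_define_treks n mountains → Pre_define_treks n mountains → Spec_define_treks n mountains (define_treks n mountains)

-- ===== LEMMAS AND PROOFS =====

-- Spec functions of the proof: cumulative uphill (pvU) and cumulative downhill (pvD) at index i.
def pvU (hs : List Int) : Nat → Int
  | 0 => 0
  | i+1 => pvU hs i + (if hs.getD (i+1) 0 > hs.getD i 0 then hs.getD (i+1) 0 - hs.getD i 0 else 0)

def pvD (hs : List Int) : Nat → Int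
  | 0 => 0
  | i+1 => pvD hs i + (if hs.getD i 0 > hs.getD (i+1) 0 then hs.getD i 0 - hs.getD (i+1) 0 else 0)

lemma pvU_congr (h1 h2 : List Int) : ∀ (i : Nat), (∀ j ≤ i, h1.getD j 0 = h2.getD j 0) →
    pvU h1 i = pvU h2 i := by
  intro i
  induction i with
  | zero => intro _; rfl
  | succ i ih =>
    intro h
    simp only [pvU, ih (fun j hj => h j (by omega)), h (i+1) (by omega), h i (by omega)]

lemma pvD_congr (h1 h2 : List Int) : ∀ (i : Nat), (∀ j ≤ i, h1.getD j 0 = h2.getD j 0) →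
    pvD h1 i = pvD h2 i := by
  intro i
  induction i with
  | zero => intro _; rfl
  | succ i ih =>
    intro h
    simp only [pvD, ih (fun j hj => h j (by omega)), h (i+1) (by omega), h i (by omega)]

-- Telescoping identity: uphill minus downhill is the total height change.
lemma pvUD (hs : List Int) : ∀ (i : Nat), pvU hs i = hs.getD i 0 - hs.getD 0 0 + pvD hs i := by
  intro i
  induction i with
  | zero => simp [pvU, pvD]
  | succ i ih =>
    simp only [pvU, pvD, ih]
    split_ifs <;> omega

-- A's loop body once the mountains[..][1] reads are expressed on the plain heights list.
def pvStep (hs : List Int) (acc : List Int) (i : Int) : List Int :=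
  acc ++ [if PySem.List.pyGetD hs i 0 > PySem.List.pyGetD hs (i-1) 0 then
            PySem.List.pyGetD acc (i-1) 0 + (PySem.List.pyGetD hs i 0 - PySem.List.pyGetD hs (i-1) 0)
          else PySem.List.pyGetD acc (i-1) 0]

lemma pvAStepL_eq (mountains : List (Int × Int)) (acc : List Int) (i : Int) :
    pvAStepL mountains acc i = pvStep (mountains.map (fun p => p.2)) acc i := by
  have e1 : (PySem.List.pyGetD mountains i (0,0)).2 =
      PySem.List.pyGetD (mountains.map (fun p => p.2)) i 0 :=
    (PySem.List.pyGetD_map (fun p : Int × Int => p.2) mountains i (0,0)).symm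
  have e2 : (PySem.List.pyGetD mountains (i-1) (0,0)).2 =
      PySem.List.pyGetD (mountains.map (fun p => p.2)) (i-1) 0 :=
    (PySem.List.pyGetD_map (fun p : Int × Int => p.2) mountains (i-1) (0,0)).symm
  simp only [pvAStepL, pvStep]
  rw [e1, e2]

lemma pvAStepR_eq (mountains : List (Int × Int)) (acc : List Int) (i : Int)
    (h1 : 1 ≤ i) (h2 : i < (mountains.length : Int)) :
    pvAStepR mountains acc i = pvStep (mountains.map (fun p => p.2)).reverse acc i := by
  set hs := mountains.map (fun p : Int × Int => p.2) with hhs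
  have hlen : hs.length = mountains.length := by simp [hhs]
  obtain ⟨j, rfl⟩ : ∃ j : Nat, i = (j : Int) := ⟨i.toNat, (Int.toNat_of_nonneg (by omega)).symm⟩
  have hj1 : 1 ≤ j := by exact_mod_cast h1
  have hj2 : j < mountains.length := by exact_mod_cast h2
  have em1 : (PySem.List.pyGetD mountains (-(j:Int)-1) (0,0)).2 = PySem.List.pyGetD hs (-(j:Int)-1) 0 :=
    (PySem.List.pyGetD_map (fun p : Int × Int => p.2) mountains (-(j:Int)-1) (0,0)).symm
  have em2 : (PySem.List.pyGetD mountains (-(j:Int)) (0,0)).2 = PySem.List.pyGetD hs (-(j:Int)) 0 :=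
    (PySem.List.pyGetD_map (fun p : Int × Int => p.2) mountains (-(j:Int)) (0,0)).symm
  have e1 : PySem.List.pyGetD hs (-(j:Int)-1) 0 = PySem.List.pyGetD hs.reverse (j:Int) 0 := by
    have hrw : (-(j:Int)-1) = -((j+1 : Nat) : Int) := by push_cast; ring
    rw [hrw, PySem.List.pyGetD_neg_natCast hs (j+1) 0 (by omega) (by omega)]
    rw [PySem.List.pyGetD_eq_getElem hs.reverse 0 (by omega)
      (by rw [List.length_reverse, hlen]; exact_mod_cast h2)]
    rw [List.getElem_reverse]
    congr 1
    omega
  have e2 : PySem.List.pyGetD hs (-(j:Int)) 0 = PySem.List.pyGetD hs.reverse ((j:Int)-1) 0 := by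
    rw [PySem.List.pyGetD_neg_natCast hs j 0 (by omega) (by omega)]
    rw [PySem.List.pyGetD_eq_getElem hs.reverse 0 (by omega)
      (by rw [List.length_reverse, hlen]; omega)]
    rw [List.getElem_reverse]
    congr 1
    omega
  simp only [pvAStepR, pvStep]
  rw [em1, em2, e1, e2]

lemma pvPyGetD_nat (hs : List Int) (j : Nat) (hj : j < hs.length) :
    PySem.List.pyGetD hs (j : Int) 0 = hs.getD j 0 := by
  rw [PySem.List.pyGetD_eq_getElem hs 0 (by omega) (by exact_mod_cast hj)]
  rw [List.getD_eq_getElem hs 0 hj]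
  simp

-- A's fold computes the uphill prefix sums pvU.
lemma pvFoldA (hs : List Int) : ∀ (k : Nat), 1 ≤ k → k ≤ hs.length →
    (PySem.List.pyRange 1 (k : Int) 1).foldl (pvStep hs) [0] = (List.range k).map (pvU hs) := by
  intro k
  induction k with
  | zero => omega
  | succ k ih =>
    intro _ hk
    by_cases hk1 : k = 0
    · subst hk1
      rw [PySem.List.pyRange_one_eq_nil (by omega)]
      simp [pvU]
    · have hcast : ((k : Int) + 1) = ((k + 1 : Nat) : Int) := by push_cast; ring
      rw [← hcast, PySem.List.pyRange_one_succ_right (by omega), List.foldl_append]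
      rw [ih (by omega) (by omega)]
      simp only [List.foldl_cons, List.foldl_nil, pvStep]
      rw [List.range_succ, List.map_append]
      have hread1 : PySem.List.pyGetD hs (k : Int) 0 = hs.getD k 0 :=
        pvPyGetD_nat hs k (by omega)
      have hread2 : PySem.List.pyGetD hs ((k : Int) - 1) 0 = hs.getD (k-1) 0 := by
        rw [show (k : Int) - 1 = ((k - 1 : Nat) : Int) from by omega]
        exact pvPyGetD_nat hs (k-1) (by omega)
      have hread3 : PySem.List.pyGetD ((List.range k).map (pvU hs)) ((k : Int) - 1) 0 = pvU hs (k-1) := by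
        rw [show (k : Int) - 1 = ((k - 1 : Nat) : Int) from by omega]
        rw [pvPyGetD_nat _ (k-1) (by simp; omega)]
        rw [List.getD_eq_getElem _ 0 (by simp; omega)]
        simp
      rw [hread1, hread2, hread3]
      simp only [List.map_cons, List.map_nil]
      have hpv : pvU hs k = pvU hs (k-1) +
          (if hs.getD k 0 > hs.getD (k-1) 0 then hs.getD k 0 - hs.getD (k-1) 0 else 0) := by
        conv_lhs => rw [show k = (k-1) + 1 from by omega]
        simp only [pvU]
        rw [show k - 1 + 1 = k from by omega]
      rw [hpv]
      split_ifs <;> simp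

-- B's drops computes the downhill prefix sums pvD.
lemma pvZipSnoc : ∀ (hs : List Int) (y : Int) (h : hs ≠ []),
    (hs ++ [y]).zip ((hs ++ [y]).drop 1) = hs.zip (hs.drop 1) ++ [(hs.getLast h, y)] := by
  intro hs
  induction hs with
  | nil => intro y h; exact absurd rfl h
  | cons a t ih =>
    intro y h
    cases t with
    | nil => simp
    | cons b t' =>
      have hrec := ih y (by simp)
      simp only [List.cons_append, List.drop_succ_cons, List.drop_zero] at hrec ⊢
      simp only [List.zip_cons_cons] at hrec ⊢
      rw [List.getLast_cons (by simp)]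
      rw [hrec]
      simp

lemma pvDropsChar : ∀ (l : List Int), pvDrops l = (List.range (max l.length 1)).map (pvD l) := by
  intro l
  induction l using List.reverseRecOn with
  | nil => simp [pvDrops, pvD, List.range_succ]
  | append_singleton l y ih =>
    by_cases hnil : l = []
    · subst hnil
      simp [pvDrops, pvD, List.range_succ]
    · have hpos : 0 < l.length := List.length_pos_of_ne_nil hnil
      have hmax : max l.length 1 = l.length := by omega
      rw [hmax] at ih
      have hmax' : max (l ++ [y]).length 1 = l.length + 1 := by simp
      have hcongr : ∀ i, i < l.length → pvD (l ++ [y]) i = pvD l i := by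
        intro i hi
        apply pvD_congr
        intro j hj
        rw [List.getD_eq_getElem (l ++ [y]) 0 (by simp; omega),
            List.getD_eq_getElem l 0 (by omega : j < l.length)]
        exact List.getElem_append_left _
      obtain ⟨q, hq⟩ : ∃ q, l.length = q + 1 := ⟨l.length - 1, by omega⟩
      simp only [pvDrops] at ih ⊢
      rw [pvZipSnoc l y hnil, List.foldl_append, ih]
      simp only [List.foldl_cons, List.foldl_nil]
      rw [hmax', List.range_succ, List.map_append]
      congr 1
      · symm
        apply List.map_congr_left
        intro i hi
        simp only [List.mem_range] at hi
        exact hcongr i hi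
      · have hlast : PySem.List.pyGetD ((List.range l.length).map (pvD l)) (-1) 0 = pvD l q := by
          rw [PySem.List.pyGetD_neg_one _ _ (by simp; omega)]
          rw [List.getLast_eq_getElem]
          simp [hq]
        rw [hlast]
        simp only [List.map_cons, List.map_nil]
        rw [hq]
        simp only [pvD]
        rw [hcongr q (by omega), ← hq]
        have hg1 : (l ++ [y]).getD q 0 = l.getLast hnil := by
          rw [List.getD_eq_getElem (l ++ [y]) 0 (by simp; omega)]
          rw [List.getLast_eq_getElem]
          have : (l ++ [y])[q] = l[q]'(by omega) := List.getElem_append_left _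
          rw [this]
          congr 1
          omega
        have hg2 : (l ++ [y]).getD l.length 0 = y := by
          rw [List.getD_eq_getElem (l ++ [y]) 0 (by simp)]
          simp
        rw [hg1, hg2]

-- Climbing a reversed list rises exactly where the forward walk drops.
lemma pvGetDRev (s : List Int) (i : Nat) (hi : i < s.length) :
    s.reverse.getD i 0 = s.getD (s.length - 1 - i) 0 := by
  rw [List.getD_eq_getElem s.reverse 0 (by simpa using hi),
      List.getD_eq_getElem s 0 (by omega : s.length - 1 - i < s.length)]
  rw [List.getElem_reverse]

lemma pvRev (s : List Int) : ∀ (j : Nat), j < s.length →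
    pvU s.reverse j = pvD s (s.length - 1) - pvD s (s.length - 1 - j) := by
  intro j
  induction j with
  | zero => intro _; simp [pvU]
  | succ j ih =>
    intro hj
    have hlen : 1 ≤ s.length := by omega
    simp only [pvU, ih (by omega)]
    rw [pvGetDRev s (j+1) (by omega), pvGetDRev s j (by omega)]
    have hidx : s.length - 1 - j = (s.length - 1 - (j+1)) + 1 := by omega
    have hstep : pvD s (s.length - 1 - j) = pvD s (s.length - 1 - (j+1)) +
        (if s.getD (s.length - 1 - (j+1)) 0 > s.getD (s.length - 1 - j) 0 then
          s.getD (s.length - 1 - (j+1)) 0 - s.getD (s.length - 1 - j) 0 else 0) := by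
      conv_lhs => rw [hidx]
      simp only [pvD]
      rw [show s.length - 1 - (j+1) + 1 = s.length - 1 - j from by omega]
    rw [hstep]
    split_ifs <;> omega

-- ===== VERDICT (by name: the statement is the Claim_ definition above) =====
theorem define_treks_spec : Claim_equal_define_treks := by
  intro n mountains _ hpre
  unfold Spec_define_treks
  simp only [define_treks, define_treks_alt]
  by_cases hn0 : n ≤ 0
  · -- both loops run zero times; left's range is empty and the suffix slice is empty
    rw [PySem.List.pyRange_one_eq_nil (by omega)]
    have hds : PySem.List.slice (mountains.map (fun p => p.2))
        (some (((mountains.map (fun p => p.2)).length : Int) - n)) none = [] := by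
      rw [PySem.List.slice_from _ (by omega)]
      apply List.drop_eq_nil_of_le
      omega
    rw [hds]
    simp [pvDrops, PySem.List.pyGetD, PySem.List.pyGet?, PySem.List.pyIdx?]
  · by_cases hnm : n ≤ (mountains.length : Int)
    · -- main case: 1 ≤ n ≤ len(mountains)
      set hs := mountains.map (fun p : Int × Int => p.2) with hhs
      have hlen : hs.length = mountains.length := by simp [hhs]
      set k := n.toNat with hk
      have hkc : (k : Int) = n := Int.toNat_of_nonneg (by omega)
      have hk1 : 1 ≤ k := by omega
      have hkm : k ≤ hs.length := by omega
      -- A's two folds compute uphill prefix sums of hs resp. hs.reverse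
      have hLA : (PySem.List.pyRange 1 n 1).foldl (pvAStepL mountains) [0]
          = (List.range k).map (pvU hs) := by
        rw [PySem.List.foldl_congr_mem _ _ (pvStep hs) _
          (fun acc i _ => pvAStepL_eq mountains acc i)]
        rw [← hkc]
        exact pvFoldA hs k hk1 hkm
      have hRA : (PySem.List.pyRange 1 n 1).foldl (pvAStepR mountains) [0]
          = (List.range k).map (pvU hs.reverse) := by
        rw [PySem.List.foldl_congr_mem _ _ (pvStep hs.reverse) _ (by
          intro acc i hi
          rw [PySem.List.mem_pyRange_one] at hi
          exact pvAStepR_eq mountains acc i hi.1 (by omega))]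
        rw [← hkc]
        exact pvFoldA hs.reverse k hk1 (by rw [List.length_reverse]; exact hkm)
      -- B's prefix slice and its drop sums
      have hslice : PySem.List.slice hs none (some n) = hs.take k := by
        rw [PySem.List.slice_to _ (by omega)]
      have hdl : pvDrops (hs.take k) = (List.range k).map (pvD (hs.take k)) := by
        rw [pvDropsChar]
        congr 2
        rw [List.length_take]
        omega
      have htakeD : ∀ i : Nat, i < k → pvD (hs.take k) i = pvD hs i := by
        intro i hi
        apply pvD_congr
        intro j hj
        rw [List.getD_eq_getElem (hs.take k) 0 (by rw [List.length_take]; omega),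
            List.getD_eq_getElem hs 0 (by omega : j < hs.length)]
        simp
      -- B's left equals A's left
      have hLB : [(0:Int)] ++ (PySem.List.pyRange 1 n 1).map (fun i =>
            PySem.List.pyGetD hs i 0 - PySem.List.pyGetD hs 0 0
              + PySem.List.pyGetD (pvDrops (PySem.List.slice hs none (some n))) i 0)
          = (List.range k).map (pvU hs) := by
        rw [hslice, hdl, List.singleton_append]
        apply List.ext_getElem
        · simp [PySem.List.length_pyRange_one]
          omega
        · intro j hj1 hj2
          simp only [List.length_cons, List.length_map, PySem.List.length_pyRange_one] at hj1
          simp only [List.length_map, List.length_range] at hj2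
          cases j with
          | zero =>
            simp [pvU]
          | succ j =>
            have hjk : j + 1 < k := hj2
            simp only [List.getElem_cons_succ, List.getElem_map,
              PySem.List.getElem_pyRange_one, List.getElem_range]
            rw [show (1 : Int) + (j : Int) = ((j + 1 : Nat) : Int) from by push_cast; ring]
            rw [pvPyGetD_nat hs (j+1) (by omega)]
            rw [PySem.List.pyGetD_zero hs 0]
            rw [pvPyGetD_nat ((List.range k).map (pvD (hs.take k))) (j+1)
              (by simp only [List.length_map, List.length_range]; omega)]
            rw [List.getD_eq_getElem ((List.range k).map (pvD (hs.take k))) 0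
              (by simp only [List.length_map, List.length_range]; omega)]
            simp only [List.getElem_map, List.getElem_range]
            rw [htakeD (j+1) (by omega)]
            rw [pvUD hs (j+1)]
      -- B's suffix slice and its drop sums
      set s := hs.drop (hs.length - k) with hss
      have hslen : s.length = k := by rw [hss, List.length_drop]; omega
      have hslice2 : PySem.List.slice hs (some ((hs.length : Int) - n)) none = s := by
        rw [PySem.List.slice_from _ (by omega)]
        rw [hss]
        congr 1
        omega
      have hds : pvDrops s = (List.range k).map (pvD s) := by
        rw [pvDropsChar]
        congr 2
        omega
      have hrevtake : s.reverse = hs.reverse.take k := by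
        rw [hss, List.reverse_drop]
        congr 1
        omega
      -- B's right equals A's right
      have hRB : (pvDrops s).reverse.map (fun x => PySem.List.pyGetD (pvDrops s) (-1) 0 - x)
          = (List.range k).map (pvU hs.reverse) := by
        rw [hds]
        have hc : PySem.List.pyGetD ((List.range k).map (pvD s)) (-1) 0 = pvD s (k-1) := by
          rw [PySem.List.pyGetD_neg_one _ _ (by simp; omega)]
          rw [List.getLast_eq_getElem]
          simp
        rw [hc]
        apply List.ext_getElem
        · simp
        · intro j hj1 hj2
          simp only [List.length_map, List.length_reverse, List.length_range] at hj1 hj2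
          simp only [List.getElem_map, List.getElem_reverse, List.getElem_range,
            List.length_map, List.length_range]
          have hUrev : pvU hs.reverse j = pvU s.reverse j := by
            apply pvU_congr
            intro j' hj'
            rw [hrevtake]
            rw [List.getD_eq_getElem hs.reverse 0 (by rw [List.length_reverse]; omega),
                List.getD_eq_getElem (hs.reverse.take k) 0 (by rw [List.length_take, List.length_reverse]; omega)]
            simp
          rw [hUrev, pvRev s j (by omega), hslen]
      rw [hLA, hRA, hslice, ← hLB, hslice2, hRB]
      rw [hslice]
    · -- from Pre_: n = 1 and mountains = []
      have hn1 : n = 1 := by rcases hpre with h | h <;> omega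
      have hm : mountains = [] := by
        cases mountains with
        | nil => rfl
        | cons a t => exfalso; simp at hnm; omega
      subst hn1; subst hm
      decide
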